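-- pv_equiv track=rewrite | github.com/AshleyChen-tech/dataStructures | practiceQuestions/simple/test3.py | convert_to_real_fee
-- ===== SOURCE A (Python) =====
-- def convert_to_real_fee(N):
--     # 转换格式
--     str_N = str(N)
--     result = 0
--     factor = 1
--
--     for i in range(len(str_N) - 1, -1, -1):
--         digit = int(str_N[i])
--         if digit > 4:
--             result += (digit - 1) * factor
--         else:
--             result += digit * factor
--         factor *= 9
--
--     return result
-- ===== SOURCE B (Python) =====
-- def convert_to_real_fee(N):
--     # Horner's method, left-to-right over the decimal digits, base 9
--     result = 0
--     for ch in str(N):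
--         d = int(ch)
--         result = result * 9 + (d - 1 if d > 4 else d)
--     return result
-- ===== Notes on version B (the rewrite author's own statement) =====
-- stated objective: simpler
-- what changed: Replaced the reverse index loop maintaining a place-value factor with a left-to-right Horner scan keeping a single accumulator scaled by the base each step.
import Mathlib
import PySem

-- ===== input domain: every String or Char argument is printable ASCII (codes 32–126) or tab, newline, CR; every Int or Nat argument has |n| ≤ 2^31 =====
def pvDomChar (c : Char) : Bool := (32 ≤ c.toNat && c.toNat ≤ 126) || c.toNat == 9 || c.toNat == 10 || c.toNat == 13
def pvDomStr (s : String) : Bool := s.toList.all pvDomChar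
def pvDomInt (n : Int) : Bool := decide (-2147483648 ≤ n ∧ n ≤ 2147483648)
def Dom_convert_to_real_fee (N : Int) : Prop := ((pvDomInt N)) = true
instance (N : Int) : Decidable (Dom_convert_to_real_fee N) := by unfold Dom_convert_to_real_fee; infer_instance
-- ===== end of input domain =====

-- B replaces A's reverse index loop with place-value factor by a left-to-right Horner scan keeping a single accumulator (simpler).
-- Pre_ excludes negative N, on which Python A raises ValueError; B raises there too.


-- ===== PORT A =====
-- int(ch) for a single char: PySem.Int.ofChars? [ch]; the .getD 0 default is never reached under Pre_ (all chars are digits)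
def pvDigitVal (c : Char) : Int := (PySem.Int.ofChars? [c]).getD 0

def pvAStep (str_N : List Char) (st : Int × Int) (i : Int) : Int × Int :=
  let digit := pvDigitVal (PySem.List.pyGetD str_N i ' ')
  if digit > 4 then (st.1 + (digit - 1) * st.2, st.2 * 9)
  else (st.1 + digit * st.2, st.2 * 9)

def convert_to_real_fee (N : Int) : Int :=
  let str_N := PySem.Int.toChars N
  ((PySem.List.pyRange ((str_N.length : Int) - 1) (-1) (-1)).foldl (pvAStep str_N) (0, 1)).1

-- ===== PORT B =====
def pvBStep (result : Int) (ch : Char) : Int :=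
  let d := pvDigitVal ch
  result * 9 + (if d > 4 then d - 1 else d)

def convert_to_real_fee_alt (N : Int) : Int :=
  (PySem.Int.toChars N).foldl pvBStep 0

-- ===== PRECONDITION & SPEC =====
-- Pre_: Python A raises ValueError on negative N (the sign character is not a digit); so does B.
def Pre_convert_to_real_fee (N : Int) : Prop := 0 ≤ N
instance (N : Int) : Decidable (Pre_convert_to_real_fee N) := by unfold Pre_convert_to_real_fee; infer_instance
def pvWitness_convert_to_real_fee : Int := 49

def Spec_convert_to_real_fee (N : Int) (out : Int) : Prop := out = convert_to_real_fee_alt N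
instance (N : Int) (out : Int) : Decidable (Spec_convert_to_real_fee N out) := by unfold Spec_convert_to_real_fee; infer_instance

-- ===== CLAIM (what is proved, stated in full; the proofs are below) =====
def Claim_equal_convert_to_real_fee : Prop := ∀ (N : Int), Dom_convert_to_real_fee N → Pre_convert_to_real_fee N → Spec_convert_to_real_fee N (convert_to_real_fee N)

-- ===== LEMMAS AND PROOFS =====

-- one step of A adds f(digit)*factor and multiplies factor by 9, whatever the branch
theorem pvAStep_eq (cs : List Char) (st : Int × Int) (i : Int) :
    pvAStep cs st i =
      (st.1 + (pvBStep 0 (PySem.List.pyGetD cs i ' ')) * st.2, st.2 * 9) := by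
  simp only [pvAStep, pvBStep]
  split_ifs with h <;> simp

-- A's reverse loop over an index list computes r + fac * Horner of the reversed digit values
theorem pvALoop (cs : List Char) (idxs : List Int) (r fac : Int) :
    ((idxs.foldl (pvAStep cs) (r, fac)).1) =
      r + fac * ((idxs.reverse.map (fun i => PySem.List.pyGetD cs i ' ')).foldl pvBStep 0) := by
  induction idxs generalizing r fac with
  | nil => simp
  | cons i rest ih =>
      simp only [List.foldl_cons, pvAStep_eq, List.reverse_cons, List.map_append,
        List.foldl_append, List.map_cons, List.map_nil, List.foldl_cons, List.foldl_nil]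
      rw [ih]
      simp only [pvBStep]
      ring

-- ===== VERDICT (by name: the statement is the Claim_ definition above) =====
-- the whole equality, for an arbitrary character list
theorem pvMain (cs : List Char) :
    ((PySem.List.pyRange ((cs.length : Int) - 1) (-1) (-1)).foldl (pvAStep cs) (0, 1)).1 =
      cs.foldl pvBStep 0 := by
  have h := PySem.List.pyRange_neg_one_eq_reverse ((cs.length : Int) - 1) (-1)
  simp only [neg_add_cancel, sub_add_cancel] at h
  rw [h, ← List.reverse_reverse (PySem.List.pyRange 0 (cs.length : Int)), List.reverse_reverse,
    pvALoop, List.reverse_reverse, PySem.List.map_pyGetD_pyRange_zero' cs ' ']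
  ring

theorem convert_to_real_fee_spec : Claim_equal_convert_to_real_fee := by
  intro N _ _
  exact pvMain (PySem.Int.toChars N)
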